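-- pv_equiv track=rewrite | github.com/claireaoi/hierarchical-rule-induction | HRI/utils/Utils.py | map_rules_to_pred
-- ===== SOURCE A (Python) =====
-- def map_rules_to_pred(num_aux, idx_aux, num_rules, pred_two_rules=None):
--     """
--     Map rules to predicates depending on ones which are associated to two rules.
--     Outputs:
--         RULES_TO_PREDICATES[rule]=predicate (index of intensional predicate)
--         PREDICATES_TO_RULES[rule]=[list index rules associated to this predicate]
--
--     """
--
--     RULES_TO_PREDICATES, PREDICATES_TO_RULES=[], []
--     count=0
--     for pred in range(num_aux):
--         if idx_aux[pred] in pred_two_rules: #of idx_auxiliary[pred] for actual index pred...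
--             RULES_TO_PREDICATES.append(pred)
--             RULES_TO_PREDICATES.append(pred)
--             PREDICATES_TO_RULES.append([count, count+1])
--             count+=2
--         else:
--             RULES_TO_PREDICATES.append(pred)
--             PREDICATES_TO_RULES.append([count])
--             count+=1
--
--     return RULES_TO_PREDICATES, PREDICATES_TO_RULES
-- ===== SOURCE B (Python) =====
-- def map_rules_to_pred(num_aux, idx_aux, num_rules, pred_two_rules=None):
--     # pass 1: rule -> predicate, each predicate emitted once or twice
--     rules_to_predicates = []
--     for pred in range(num_aux):
--         rules_to_predicates += [pred] * (2 if idx_aux[pred] in pred_two_rules else 1)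
--     # pass 2: invert the map by bucketing rule indices under their predicate
--     predicates_to_rules = [[] for _ in range(num_aux)]
--     for rule, pred in enumerate(rules_to_predicates):
--         predicates_to_rules[pred].append(rule)
--     return rules_to_predicates, predicates_to_rules
-- ===== Notes on version B (the rewrite author's own statement) =====
-- stated objective: alternative
-- what changed: Instead of maintaining an inline rule counter and appending to both outputs in one loop, B builds only RULES_TO_PREDICATES first and then computes PREDICATES_TO_RULES as its inverse map by bucketing rule indices under their predicate (no counter, second output derived from the first).
import Mathlib
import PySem

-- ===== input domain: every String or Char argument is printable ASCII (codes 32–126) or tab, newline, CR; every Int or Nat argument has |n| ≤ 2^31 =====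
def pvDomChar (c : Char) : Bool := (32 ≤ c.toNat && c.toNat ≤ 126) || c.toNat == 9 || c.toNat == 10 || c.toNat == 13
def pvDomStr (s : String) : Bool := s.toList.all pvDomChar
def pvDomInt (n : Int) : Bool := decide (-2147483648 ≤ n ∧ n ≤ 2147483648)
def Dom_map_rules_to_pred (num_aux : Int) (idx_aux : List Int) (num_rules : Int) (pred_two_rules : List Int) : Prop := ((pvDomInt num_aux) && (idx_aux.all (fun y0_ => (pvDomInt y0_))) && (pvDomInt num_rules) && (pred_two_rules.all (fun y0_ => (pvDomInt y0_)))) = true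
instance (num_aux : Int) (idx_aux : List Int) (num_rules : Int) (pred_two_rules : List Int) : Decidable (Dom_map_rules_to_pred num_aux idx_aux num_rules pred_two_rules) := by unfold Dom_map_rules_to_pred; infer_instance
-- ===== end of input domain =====

-- B builds only RULES_TO_PREDICATES in its loop, then derives PREDICATES_TO_RULES as the
-- inverse map by bucketing rule indices under their predicate (alternative decomposition, same cost, no inline counter).


-- ===== PORT A =====
-- single loop over range(num_aux), appending to both lists with an inline counter
def map_rules_to_pred (num_aux : Int) (idx_aux : List Int) (num_rules : Int) (pred_two_rules : List Int) : List Int × List (List Int) :=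
  let st := (PySem.List.pyRange 0 num_aux 1).foldl
    (fun (st : List Int × List (List Int) × Int) pred =>
      if pred_two_rules.contains (PySem.List.pyGetD idx_aux pred 0) then
        (st.1 ++ [pred, pred], st.2.1 ++ [[st.2.2, st.2.2 + 1]], st.2.2 + 2)
      else
        (st.1 ++ [pred], st.2.1 ++ [[st.2.2]], st.2.2 + 1))
    ([], [], 0)
  (st.1, st.2.1)

-- ===== PORT B =====
-- pass 1: rule -> predicate (each pred once or twice); pass 2: bucket rule indices under
-- their predicate ('predicates_to_rules[pred].append(rule)'); pred is always ≥ 0 inside the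
-- loop (it comes from range(num_aux)), so '.toNat' is exactly Python's nonnegative indexing here.
def map_rules_to_pred_alt (num_aux : Int) (idx_aux : List Int) (num_rules : Int) (pred_two_rules : List Int) : List Int × List (List Int) :=
  let rules_to_predicates := (PySem.List.pyRange 0 num_aux 1).foldl
    (fun (acc : List Int) pred =>
      acc ++ (if pred_two_rules.contains (PySem.List.pyGetD idx_aux pred 0) then [pred, pred] else [pred]))
    []
  let predicates_to_rules := (PySem.List.enumerate rules_to_predicates 0).foldl
    (fun (bs : List (List Int)) rp => bs.modify rp.2.toNat (· ++ [rp.1]))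
    (List.replicate num_aux.toNat [])
  (rules_to_predicates, predicates_to_rules)

-- ===== PRECONDITION & SPEC =====
-- Pre_ excludes exactly the inputs where Python A raises IndexError: range(num_aux) probing idx_aux[pred] beyond its length.
def Pre_map_rules_to_pred (num_aux : Int) (idx_aux : List Int) (num_rules : Int) (pred_two_rules : List Int) : Prop :=
  num_aux ≤ (idx_aux.length : Int)
instance (num_aux : Int) (idx_aux : List Int) (num_rules : Int) (pred_two_rules : List Int) : Decidable (Pre_map_rules_to_pred num_aux idx_aux num_rules pred_two_rules) := by unfold Pre_map_rules_to_pred; infer_instance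
def pvWitness_map_rules_to_pred : Int × List Int × Int × List Int := (2, [5, 7], 3, [7])
def Spec_map_rules_to_pred (num_aux : Int) (idx_aux : List Int) (num_rules : Int) (pred_two_rules : List Int) (out : List Int × List (List Int)) : Prop := out = map_rules_to_pred_alt num_aux idx_aux num_rules pred_two_rules
instance (num_aux : Int) (idx_aux : List Int) (num_rules : Int) (pred_two_rules : List Int) (out : List Int × List (List Int)) : Decidable (Spec_map_rules_to_pred num_aux idx_aux num_rules pred_two_rules out) := by unfold Spec_map_rules_to_pred; infer_instance

-- ===== CLAIM (what is proved, stated in full; the proofs are below) =====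
def Claim_equal_map_rules_to_pred : Prop := ∀ (num_aux : Int) (idx_aux : List Int) (num_rules : Int) (pred_two_rules : List Int), Dom_map_rules_to_pred num_aux idx_aux num_rules pred_two_rules → Pre_map_rules_to_pred num_aux idx_aux num_rules pred_two_rules → Spec_map_rules_to_pred num_aux idx_aux num_rules pred_two_rules (map_rules_to_pred num_aux idx_aux num_rules pred_two_rules)

-- ===== LEMMAS AND PROOFS =====

lemma pvRangeToNat (a : Int) : PySem.List.pyRange 0 a 1 = PySem.List.pyRange 0 (a.toNat : Int) 1 := by
  rw [PySem.List.pyRange_one, PySem.List.pyRange_one]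
  have h : (a - 0).toNat = ((a.toNat : Int) - 0).toNat := by omega
  rw [h]

-- does pred n get two rules?
def pvTwo (idx_aux pred_two_rules : List Int) (p : Int) : Bool :=
  pred_two_rules.contains (PySem.List.pyGetD idx_aux p 0)

-- the first output after n predicates
def pvR (idx_aux pred_two_rules : List Int) : Nat → List Int
  | 0 => []
  | n + 1 => pvR idx_aux pred_two_rules n ++
      (if pvTwo idx_aux pred_two_rules (n : Int) then [(n : Int), (n : Int)] else [(n : Int)])

-- the rule counter after n predicates
def pvC (idx_aux pred_two_rules : List Int) : Nat → Int
  | 0 => 0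
  | n + 1 => pvC idx_aux pred_two_rules n + (if pvTwo idx_aux pred_two_rules (n : Int) then 2 else 1)

-- the second output after n predicates
def pvP (idx_aux pred_two_rules : List Int) : Nat → List (List Int)
  | 0 => []
  | n + 1 => pvP idx_aux pred_two_rules n ++
      [if pvTwo idx_aux pred_two_rules (n : Int) then
        [pvC idx_aux pred_two_rules n, pvC idx_aux pred_two_rules n + 1]
       else [pvC idx_aux pred_two_rules n]]

lemma pvC_eq_lenR (idx_aux pred_two_rules : List Int) (n : Nat) :
    pvC idx_aux pred_two_rules n = ((pvR idx_aux pred_two_rules n).length : Int) := by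
  induction n with
  | zero => simp [pvC, pvR]
  | succ n ih =>
    by_cases h : pvTwo idx_aux pred_two_rules (n : Int) <;>
      simp [pvC, pvR, h, ih] <;> push_cast <;> ring

lemma pvLenP (idx_aux pred_two_rules : List Int) (n : Nat) :
    (pvP idx_aux pred_two_rules n).length = n := by
  induction n with
  | zero => rfl
  | succ n ih => simp [pvP, ih]

lemma pvModifyAt {α : Type} (l1 : List α) (x : α) (l2 : List α) (f : α → α) :
    (l1 ++ x :: l2).modify l1.length f = l1 ++ f x :: l2 := by
  induction l1 with
  | nil => simp [List.modify, List.modifyTailIdx, List.modifyTailIdx.go]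
  | cons a t ih =>
    simpa [List.modify, List.modifyTailIdx, List.modifyTailIdx.go] using ih

lemma pvModifyAtLen {α : Type} (l1 : List α) (x : α) (l2 : List α) (f : α → α) (k : Nat)
    (hk : l1.length = k) : (l1 ++ x :: l2).modify k f = l1 ++ f x :: l2 := by
  subst hk; exact pvModifyAt l1 x l2 f

-- A's fold produces (pvR, pvP, pvC)
lemma pvFoldA (idx_aux pred_two_rules : List Int) (n : Nat) :
    (PySem.List.pyRange 0 (n : Int) 1).foldl
      (fun (st : List Int × List (List Int) × Int) pred =>
        if pred_two_rules.contains (PySem.List.pyGetD idx_aux pred 0) then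
          (st.1 ++ [pred, pred], st.2.1 ++ [[st.2.2, st.2.2 + 1]], st.2.2 + 2)
        else
          (st.1 ++ [pred], st.2.1 ++ [[st.2.2]], st.2.2 + 1))
      ([], [], 0)
    = (pvR idx_aux pred_two_rules n, pvP idx_aux pred_two_rules n, pvC idx_aux pred_two_rules n) := by
  induction n with
  | zero => rw [Nat.cast_zero, PySem.List.pyRange_one_eq_nil (le_refl 0)]; rfl
  | succ n ih =>
    have hcast : ((n + 1 : Nat) : Int) = (n : Int) + 1 := by push_cast; ring
    rw [hcast, PySem.List.pyRange_one_succ_right (by positivity), List.foldl_append, ih]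
    by_cases h : pvTwo idx_aux pred_two_rules (n : Int) <;>
      simp [pvTwo, pvR, pvP, pvC, h] at * <;> simp [h]

-- B's first fold produces pvR
lemma pvFoldB1 (idx_aux pred_two_rules : List Int) (n : Nat) :
    (PySem.List.pyRange 0 (n : Int) 1).foldl
      (fun (acc : List Int) pred =>
        acc ++ (if pred_two_rules.contains (PySem.List.pyGetD idx_aux pred 0) then [pred, pred] else [pred]))
      []
    = pvR idx_aux pred_two_rules n := by
  induction n with
  | zero => rw [Nat.cast_zero, PySem.List.pyRange_one_eq_nil (le_refl 0)]; rfl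
  | succ n ih =>
    have hcast : ((n + 1 : Nat) : Int) = (n : Int) + 1 := by push_cast; ring
    rw [hcast, PySem.List.pyRange_one_succ_right (by positivity), List.foldl_append, ih]
    by_cases h : pvTwo idx_aux pred_two_rules (n : Int) <;> simp [pvTwo, pvR, h] at * <;> simp [h]

-- B's bucketing fold over pvR rebuilds pvP (generalized over a tail of untouched buckets)
lemma pvBucket (idx_aux pred_two_rules : List Int) (n : Nat) (tail : List (List Int)) :
    (PySem.List.enumerate (pvR idx_aux pred_two_rules n) 0).foldl
      (fun (bs : List (List Int)) rp => bs.modify rp.2.toNat (· ++ [rp.1]))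
      (List.replicate n [] ++ tail)
    = pvP idx_aux pred_two_rules n ++ tail := by
  induction n generalizing tail with
  | zero => rfl
  | succ n ih =>
    have hrepl : List.replicate (n + 1) ([] : List Int) ++ tail
        = List.replicate n [] ++ ([] :: tail) := by
      rw [List.replicate_succ']; simp
    rw [pvR, PySem.List.enumerate_append, List.foldl_append, hrepl, ih ([] :: tail)]
    have hstart : ((0 : Int) + ((pvR idx_aux pred_two_rules n).length : Int))
        = pvC idx_aux pred_two_rules n := by rw [pvC_eq_lenR]; ring
    have hP : (pvP idx_aux pred_two_rules n).length = n := pvLenP idx_aux pred_two_rules n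
    by_cases h : pvTwo idx_aux pred_two_rules (n : Int)
    · simp only [h, if_true, PySem.List.enumerate_cons, PySem.List.enumerate_nil,
        List.foldl_cons, List.foldl_nil, hstart, Int.toNat_natCast]
      rw [pvModifyAtLen _ _ _ _ n hP, pvModifyAtLen _ _ _ _ n hP]
      simp [pvP, h]
    · simp only [h, Bool.false_eq_true, if_false, PySem.List.enumerate_cons,
        PySem.List.enumerate_nil, List.foldl_cons, List.foldl_nil, hstart, Int.toNat_natCast]
      rw [pvModifyAtLen _ _ _ _ n hP]
      simp [pvP, h]

-- ===== VERDICT (by name: the statement is the Claim_ definition above) =====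
theorem map_rules_to_pred_spec : Claim_equal_map_rules_to_pred := by
  intro num_aux idx_aux num_rules pred_two_rules _ hpre
  unfold Spec_map_rules_to_pred map_rules_to_pred map_rules_to_pred_alt
  rw [pvRangeToNat num_aux]
  rw [pvFoldA idx_aux pred_two_rules num_aux.toNat, pvFoldB1 idx_aux pred_two_rules num_aux.toNat]
  have hb := pvBucket idx_aux pred_two_rules num_aux.toNat []
  simp only [List.append_nil] at hb
  simp [hb]
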